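-- pv_equiv track=rewrite | github.com/notforyou23/COSMO_BrainStudio | brains/ArtandMusic2.brain/outputs/code-creation/agent_1766627600824_tsx5v9t/src/claim_card/run_pilot.py | _semverish
-- ===== SOURCE A (Python) =====
-- def _semverish(s: str) -> bool:
--     if not isinstance(s, str) or not s.strip():
--         return False
--     s = s.strip().lstrip("v")
--     parts = s.split(".")
--     if len(parts) < 2 or len(parts) > 3:
--         return False
--     return all(p.isdigit() for p in parts)
-- ===== SOURCE B (Python) =====
-- def _semverish(s) -> bool:
--     # Single left-to-right scan instead of split + all: count segments and
--     # track whether the current segment has seen a digit.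
--     if not isinstance(s, str):
--         return False
--     t = s.strip().lstrip("v")
--     segments = 1
--     seen_digit = False
--     for c in t:
--         if c == ".":
--             if not seen_digit:
--                 return False
--             segments += 1
--             seen_digit = False
--         elif c.isdigit():
--             seen_digit = True
--         else:
--             return False
--     return seen_digit and 2 <= segments <= 3
-- ===== Notes on version B (the rewrite author's own statement) =====
-- stated objective: alternative
-- what changed: Replaces strip + split-on-dot + all(isdigit) with a single character scan that counts segments and tracks a seen-digit flag per segment, with no intermediate list of parts.
import Mathlib
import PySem

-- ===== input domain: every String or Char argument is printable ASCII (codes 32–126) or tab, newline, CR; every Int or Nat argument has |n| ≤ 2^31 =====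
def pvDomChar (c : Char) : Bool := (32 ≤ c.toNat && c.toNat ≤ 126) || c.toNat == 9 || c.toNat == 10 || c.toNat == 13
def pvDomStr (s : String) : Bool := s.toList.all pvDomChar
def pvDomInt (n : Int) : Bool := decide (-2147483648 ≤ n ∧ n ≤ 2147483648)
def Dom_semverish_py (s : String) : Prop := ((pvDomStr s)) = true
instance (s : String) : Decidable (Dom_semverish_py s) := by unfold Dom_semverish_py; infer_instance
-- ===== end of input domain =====

-- B replaces split-on-dot + all(isdigit) with a single character scan counting segments; same O(n) cost, different decomposition.


-- ===== PORT A =====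
-- isinstance(s, str) is always true under the type convention; s.lstrip("v") with a
-- single-character strip set is exactly dropWhile (· == 'v') on the leading characters.
def semverish_py (s : String) : Bool :=
  if (PySem.Str.strip s).toList = [] then false    -- "not s.strip()"
  else
    let s1 := (PySem.Str.strip s).toList.dropWhile (fun c => c == 'v')  -- s.strip().lstrip("v")
    let parts := PySem.Chars.splitOn s1 ['.']       -- s.split("."), sep "." nonempty: exact
    if parts.length < 2 || parts.length > 3 then false
    else parts.all (fun p => PySem.Chars.strIsdigit p)

-- ===== PORT B =====
def pvScan : List Char → Nat → Bool → Bool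
  | [], segments, seen => seen && decide (2 ≤ segments) && decide (segments ≤ 3)
  | c :: rest, segments, seen =>
    if c == '.' then
      if seen then pvScan rest (segments + 1) false else false
    else if PySem.Chars.isdigit c then pvScan rest segments true
    else false

def semverish_py_alt (s : String) : Bool :=
  pvScan ((PySem.Str.strip s).toList.dropWhile (fun c => c == 'v')) 1 false

-- ===== PRECONDITION & SPEC =====
def Spec_semverish_py (s : String) (out : Bool) : Prop := out = semverish_py_alt s
instance (s : String) (out : Bool) : Decidable (Spec_semverish_py s out) := by unfold Spec_semverish_py; infer_instance

-- ===== CLAIM (what is proved, stated in full; the proofs are below) =====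
def Claim_equal_semverish_py : Prop := ∀ (s : String), Dom_semverish_py s → Spec_semverish_py s (semverish_py s)

-- ===== LEMMAS AND PROOFS =====

-- Reference single-'.' splitter: splitDot pre t prepends pre to the first piece.
def splitDot (pre : List Char) : List Char → List (List Char)
  | [] => [pre]
  | c :: rest => if c == '.' then pre :: splitDot [] rest else splitDot (pre ++ [c]) rest

theorem go_eq_splitDot : ∀ (fuel : Nat) (l cur : List Char) (acc : List (List Char)),
    l.length < fuel →
    PySem.Chars.splitOn.go ['.'] fuel l cur acc = acc.reverse ++ splitDot cur.reverse l := by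
  intro fuel
  induction fuel with
  | zero => intro l cur acc h; omega
  | succ n ih =>
    intro l cur acc h
    cases l with
    | nil => simp [PySem.Chars.splitOn.go, splitDot]
    | cons c rest =>
      by_cases hc : c = '.'
      · subst hc
        have : PySem.Chars.splitOn.go ['.'] (n+1) ('.' :: rest) cur acc
            = PySem.Chars.splitOn.go ['.'] n rest [] (cur.reverse :: acc) := by
          simp [PySem.Chars.splitOn.go, List.isPrefixOf]
        rw [this, ih rest [] (cur.reverse :: acc) (by simpa using Nat.lt_of_succ_lt_succ h)]
        simp [splitDot]
      · have : PySem.Chars.splitOn.go ['.'] (n+1) (c :: rest) cur acc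
            = PySem.Chars.splitOn.go ['.'] n rest (c :: cur) acc := by
          simp only [PySem.Chars.splitOn.go, List.isPrefixOf]
          simp
          exact fun h => absurd h.symm hc
        rw [this, ih rest (c :: cur) acc (by simpa using Nat.lt_of_succ_lt_succ h)]
        simp [splitDot, hc]

theorem splitOn_eq_splitDot (l : List Char) :
    PySem.Chars.splitOn l ['.'] = splitDot [] l := by
  unfold PySem.Chars.splitOn
  simpa using go_eq_splitDot (l.length + 1) l [] [] (by omega)

-- the first piece of splitDot pre t starts with pre
theorem splitDot_head : ∀ (t pre : List Char), ∃ u rest', splitDot pre t = (pre ++ u) :: rest' := by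
  intro t
  induction t with
  | nil => intro pre; exact ⟨[], [], by simp [splitDot]⟩
  | cons c rest ih =>
    intro pre
    by_cases hc : c = '.'
    · exact ⟨[], splitDot [] rest, by simp [splitDot, hc]⟩
    · obtain ⟨u, r', hu⟩ := ih (pre ++ [c])
      exact ⟨c :: u, r', by simp [splitDot, hc, hu]⟩

theorem pvScan_eq_splitDot : ∀ (t pre : List Char) (k : Nat),
    pre.all PySem.Chars.isdigit = true →
    pvScan t (k + 1) (!pre.isEmpty)
      = ((decide (2 ≤ k + (splitDot pre t).length) && decide (k + (splitDot pre t).length ≤ 3))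
          && (splitDot pre t).all PySem.Chars.strIsdigit) := by
  intro t
  induction t with
  | nil =>
    intro pre k hall
    simp [pvScan, splitDot, PySem.Chars.strIsdigit, hall]
    cases pre <;> simp [Bool.and_comm]
  | cons c rest ih =>
    intro pre k hall
    by_cases hc : c = '.'
    · subst hc
      cases pre with
      | nil => simp [pvScan, splitDot, PySem.Chars.strIsdigit]
      | cons p ps =>
        have h1 : pvScan ('.' :: rest) (k + 1) (!(p :: ps).isEmpty)
            = pvScan rest (k + 1 + 1) false := by simp [pvScan]
        have h2 := ih [] (k + 1) (by simp)
        simp only [List.isEmpty_nil, Bool.not_true] at h2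
        rw [h1, h2]
        have hstr : PySem.Chars.strIsdigit (p :: ps) = true := by
          simp [PySem.Chars.strIsdigit, hall]
        have harr : k + 1 + (splitDot [] rest).length = k + ((splitDot [] rest).length + 1) := by
          omega
        simp [splitDot, hstr, harr]
    · by_cases hd : PySem.Chars.isdigit c = true
      · have h1 : pvScan (c :: rest) (k + 1) (!pre.isEmpty) = pvScan rest (k + 1) true := by
          simp [pvScan, hc, hd]
        have h2 := ih (pre ++ [c]) k (by simp [hall, hd])
        have h3 : (!(pre ++ [c]).isEmpty) = true := by simp
        rw [h3] at h2
        rw [h1, h2]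
        simp [splitDot, hc]
      · have h1 : pvScan (c :: rest) (k + 1) (!pre.isEmpty) = false := by
          simp [pvScan, hc, hd]
        obtain ⟨u, r', hu⟩ := splitDot_head rest (pre ++ [c])
        have hd' : PySem.Chars.isdigit c = false := by simpa using hd
        have hfalse : (splitDot (pre ++ [c]) rest).all PySem.Chars.strIsdigit = false := by
          rw [hu, List.all_cons]
          have hall' : (pre ++ [c] ++ u).all PySem.Chars.isdigit = false := by
            rw [List.all_append, List.all_append, List.all_cons, List.all_nil, hd']
            simp
          have hcd : PySem.Chars.strIsdigit (pre ++ [c] ++ u) = false := by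
            unfold PySem.Chars.strIsdigit
            rw [hall', Bool.and_false]
          rw [hcd, Bool.false_and]
        rw [h1]
        simp [splitDot, hc, hfalse]

-- ===== VERDICT (by name: the statement is the Claim_ definition above) =====
theorem if_len_eq (parts : List (List Char)) (p : List Char → Bool) :
    (if parts.length < 2 || parts.length > 3 then false else parts.all p)
      = ((decide (2 ≤ parts.length) && decide (parts.length ≤ 3)) && parts.all p) := by
  by_cases h : parts.length < 2 ∨ parts.length > 3
  · have h1 : (parts.length < 2 || parts.length > 3) = true := by
      rcases h with h | h <;> simp [h]
    have h2 : (decide (2 ≤ parts.length) && decide (parts.length ≤ 3)) = false := by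
      rcases h with h | h <;> simp <;> omega
    rw [h1, h2, if_pos rfl, Bool.false_and]
  · have h1 : (parts.length < 2 || parts.length > 3) = false := by
      simp only [not_or, not_lt, gt_iff_lt] at h
      simp; omega
    have h2 : (decide (2 ≤ parts.length) && decide (parts.length ≤ 3)) = true := by
      simp only [not_or, not_lt, gt_iff_lt] at h
      simp; omega
    rw [h1, h2, if_neg (by simp), Bool.true_and]

-- ===== VERDICT (by name: the statement is the Claim_ definition above) =====
theorem semverish_py_spec : Claim_equal_semverish_py := by
  intro s _
  unfold Spec_semverish_py semverish_py semverish_py_alt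
  by_cases hs : (PySem.Str.strip s).toList = []
  · simp [hs, pvScan]
  · simp only [hs, if_false]
    rw [splitOn_eq_splitDot]
    have h := pvScan_eq_splitDot ((PySem.Str.strip s).toList.dropWhile (fun c => c == 'v')) [] 0
      (by simp)
    simp only [List.isEmpty_nil, Bool.not_true, Nat.zero_add] at h
    rw [h, if_len_eq]
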